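-- pv_equiv track=rewrite | github.com/abbasmoosajee07/AdventofCode | 2021/06/2021Day06.py | daily_fish_growth
-- ===== SOURCE A (Python) =====
-- def  daily_fish_growth(fish_list):
--     next_day = fish_list[:]
--     for idx, fish in enumerate(fish_list):
--         if fish == 0:
--             next_day[idx] = 6
--             next_day.append(8)
--         else:
--             next_day[idx] = fish - 1
--     return next_day
-- ===== SOURCE B (Python) =====
-- def _grow(seg):
--     # divide and conquer: returns (aged values of seg in order, spawned 8s for seg)
--     n = len(seg)
--     if n == 0:
--         return [], []
--     if n == 1:
--         f = seg[0]
--         return ([6], [8]) if f == 0 else ([f - 1], [])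
--     mid = n // 2
--     la, le = _grow(seg[:mid])
--     ra, re = _grow(seg[mid:])
--     return la + ra, le + re
--
--
-- def daily_fish_growth(fish_list):
--     aged, eights = _grow(fish_list)
--     return aged + eights
-- ===== Notes on version B (the rewrite author's own statement) =====
-- stated objective: alternative
-- what changed: Replaces A's single copy-and-mutate loop (index assignment plus append while iterating) with a divide-and-conquer recursion that splits the list in half, returns (aged, spawned-8s) pairs for each half and merges them by concatenation; the input is never mutated.
import Mathlib
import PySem

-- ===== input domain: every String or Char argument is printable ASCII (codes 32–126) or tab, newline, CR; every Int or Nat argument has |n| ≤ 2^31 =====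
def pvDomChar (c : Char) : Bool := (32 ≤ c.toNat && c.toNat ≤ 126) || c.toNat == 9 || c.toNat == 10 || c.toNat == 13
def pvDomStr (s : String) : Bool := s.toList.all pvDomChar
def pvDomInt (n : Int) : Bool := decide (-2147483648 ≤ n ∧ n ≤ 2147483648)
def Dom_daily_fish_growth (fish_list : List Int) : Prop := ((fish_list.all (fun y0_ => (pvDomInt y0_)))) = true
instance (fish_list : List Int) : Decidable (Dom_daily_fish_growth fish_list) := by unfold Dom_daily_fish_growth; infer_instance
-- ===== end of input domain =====

-- B replaces A's copy-and-mutate-while-appending loop by a divide-and-conquer recursion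
-- that splits the list in half and merges (aged, spawned) pairs (objective: alternative;
-- A copies its argument, so neither version mutates the input).

-- ===== PORT A =====
-- next_day = fish_list[:]; for idx, fish in enumerate(fish_list): mutate next_day.
-- idx is always a valid non-negative index into next_day, so next_day[idx] = v is exactly pySetD.
def daily_fish_growth (fish_list : List Int) : List Int :=
  (PySem.List.enumerate fish_list 0).foldl
    (fun next_day p =>
      if p.2 == 0 then (PySem.List.pySetD next_day p.1 6) ++ [8]
      else PySem.List.pySetD next_day p.1 (p.2 - 1))
    fish_list

-- ===== PORT B =====
-- _grow: divide and conquer, returns (aged values in order, spawned 8s)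
def pvGrow : List Int → List Int × List Int
  | [] => ([], [])
  | [f] => if f == 0 then ([6], [8]) else ([f - 1], [])
  | a :: b :: t =>
    let seg := a :: b :: t
    let mid := seg.length / 2
    let l := pvGrow (seg.take mid)
    let r := pvGrow (seg.drop mid)
    (l.1 ++ r.1, l.2 ++ r.2)
termination_by seg => seg.length
decreasing_by
  · simp only [List.length_take]; simp; omega
  · simp only [List.length_drop]; simp; omega

def daily_fish_growth_alt (fish_list : List Int) : List Int :=
  (pvGrow fish_list).1 ++ (pvGrow fish_list).2

-- ===== PRECONDITION & SPEC =====
def Spec_daily_fish_growth (fish_list : List Int) (out : List Int) : Prop := out = daily_fish_growth_alt fish_list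
instance (fish_list : List Int) (out : List Int) : Decidable (Spec_daily_fish_growth fish_list out) := by unfold Spec_daily_fish_growth; infer_instance

-- ===== CLAIM (what is proved, stated in full; the proofs are below) =====
def Claim_equal_daily_fish_growth : Prop := ∀ (fish_list : List Int), Dom_daily_fish_growth fish_list → Spec_daily_fish_growth fish_list (daily_fish_growth fish_list)

-- ===== LEMMAS AND PROOFS =====

-- setting the element just past a prefix
theorem set_append_cons {α : Type} (pre : List α) (x v : α) (t : List α) :
    (pre ++ x :: t).set pre.length v = pre ++ v :: t := by
  induction pre with
  | nil => rfl
  | cons a pre ih => simp [ih]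

-- loop invariant for A's fold: the state is pre ++ l ++ eights, the index runs from pre.length,
-- processed fish land behind pre and every appended 8 lands behind eights
theorem fold_invariant (l : List Int) : ∀ (pre eights : List Int),
    (PySem.List.enumerate l (pre.length : Int)).foldl
      (fun next_day p =>
        if p.2 == 0 then (PySem.List.pySetD next_day p.1 6) ++ [8]
        else PySem.List.pySetD next_day p.1 (p.2 - 1))
      (pre ++ l ++ eights)
    = pre ++ (l.map (fun f => if f == 0 then 6 else f - 1))
        ++ eights ++ List.replicate (l.countP (fun f => f == 0)) 8 := by
  induction l with
  | nil => intro pre eights; simp [PySem.List.enumerate_nil]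
  | cons x xs ih =>
    intro pre eights
    rw [PySem.List.enumerate_cons, List.foldl_cons]
    by_cases hx : x = 0
    · subst hx
      have h2 := ih (pre ++ [(6:Int)]) (eights ++ [8])
      simp only [List.length_append, List.length_cons, List.length_nil, Nat.cast_add,
        Nat.cast_one, zero_add] at h2
      simp only [beq_self_eq_true, if_true, PySem.List.pySetD_natCast,
        List.map_cons, List.countP_cons, List.replicate_succ]
      simp only [List.append_assoc, List.cons_append,
        List.nil_append, beq_iff_eq] at h2 ⊢
      rw [set_append_cons]
      simpa using h2
    · have h2 := ih (pre ++ [x - 1]) eights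
      simp only [List.length_append, List.length_cons, List.length_nil, Nat.cast_add,
        Nat.cast_one, zero_add] at h2
      have hb : (x == 0) = false := by simp [hx]
      simp only [hb, if_false, Bool.false_eq_true, PySem.List.pySetD_natCast,
        List.map_cons, List.countP_cons, Nat.add_zero]
      simp only [List.append_assoc, List.cons_append,
        List.nil_append, beq_iff_eq] at h2 ⊢
      rw [set_append_cons]
      exact h2

-- B's divide-and-conquer recursion computes the map and the zero count
theorem pvGrow_eq (seg : List Int) :
    pvGrow seg = (seg.map (fun f => if f == 0 then 6 else f - 1),
                  List.replicate (seg.countP (fun f => f == 0)) 8) := by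
  induction seg using pvGrow.induct with
  | case1 => simp [pvGrow]
  | case2 f h => simp only [beq_iff_eq] at h; simp [pvGrow, h]
  | case3 f h => simp only [beq_iff_eq] at h; simp [pvGrow, h]
  | case4 a b t seg mid ih2 ih1 =>
    rw [pvGrow]
    rw [ih1, ih2]
    have hs := List.take_append_drop ((a :: b :: t).length / 2) (a :: b :: t)
    conv_rhs => rw [← hs]
    simp only [List.replicate_append_replicate]
    refine Prod.ext ?_ ?_
    · simp [seg]
    · rw [← List.countP_append, List.take_append_drop]

-- ===== VERDICT (by name: the statement is the Claim_ definition above) =====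
theorem daily_fish_growth_spec : Claim_equal_daily_fish_growth := by
  intro fish_list _
  unfold Spec_daily_fish_growth daily_fish_growth daily_fish_growth_alt
  rw [pvGrow_eq]
  have h := fold_invariant fish_list [] []
  simpa using h
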